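-- pv_equiv track=rewrite | github.com/mprashanth27/tip-102-codepath | unit-4/session-2/adv-problem-set-v1/p2_grp80.py | find_most_frequent_keywords
-- ===== SOURCE A (Python) =====
-- def find_most_frequent_keywords(scenes):
--     #T = O(nk), M = O(n)
--     word_count = {}
--     for keywords in scenes.values():
--         for keyword in keywords:
--             if keyword in word_count:
--                 word_count[keyword] += 1
--             else:
--                 word_count[keyword] = 1
--     max_freq = max(word_count.values())
--     res = []
--     for word in word_count:
--         if word_count[word] == max_freq:
--             res.append(word)
--     return res
-- ===== SOURCE B (Python) =====
-- def find_most_frequent_keywords(scenes):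
--     # One pass over the count dict with a running maximum, instead of
--     # computing max(values) first and then re-scanning the dict to filter.
--     counts = {}
--     for keywords in scenes.values():
--         for w in keywords:
--             counts[w] = counts.get(w, 0) + 1
--     best = None
--     res = []
--     for w, c in counts.items():
--         if best is None or c > best:
--             best = c
--             res = [w]
--         elif c == best:
--             res.append(w)
--     return res
-- ===== Notes on version B (the rewrite author's own statement) =====
-- stated objective: alternative
-- what changed: B replaces A's two-pass selection (max over the count dict's values, then a second scan filtering the dict for that maximum) with a single scan over the count dict that maintains a running best frequency and the list of its words; tie/appearance order is preserved.
import Mathlib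
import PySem

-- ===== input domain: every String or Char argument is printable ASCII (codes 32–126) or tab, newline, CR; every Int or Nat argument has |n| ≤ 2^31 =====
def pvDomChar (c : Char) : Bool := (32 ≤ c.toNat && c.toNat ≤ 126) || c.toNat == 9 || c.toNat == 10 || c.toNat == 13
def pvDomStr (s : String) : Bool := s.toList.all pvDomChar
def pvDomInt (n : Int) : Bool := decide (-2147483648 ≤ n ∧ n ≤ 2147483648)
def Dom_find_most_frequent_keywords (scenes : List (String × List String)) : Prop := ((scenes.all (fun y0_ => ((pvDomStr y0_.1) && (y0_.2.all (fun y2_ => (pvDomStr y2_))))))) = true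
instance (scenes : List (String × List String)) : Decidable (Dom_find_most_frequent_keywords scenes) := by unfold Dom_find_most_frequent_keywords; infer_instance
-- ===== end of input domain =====

-- B replaces A's two-pass selection (max over the count dict's values, then a second
-- scan filtering the dict for that maximum) with a single scan of the count dict
-- maintaining a running best frequency and the list of its words.

-- ===== PORT A =====
def find_most_frequent_keywords (scenes : List (String × List String)) : List String :=
  -- word_count = {}; for keywords in scenes.values(): for keyword in keywords: …
  let word_count : PySem.Dict String Int :=
    scenes.foldl (fun d p =>
      p.2.foldl (fun d keyword =>
        if d.contains keyword then
          d.insert keyword (d.getD keyword 0 + 1)   -- word_count[keyword] += 1 (key present, so getD is its value)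
        else
          d.insert keyword 1) d) PySem.Dict.empty
  -- max_freq = max(word_count.values())  (ValueError on empty dict: Pre_ excludes it; the port returns [] there)
  match PySem.List.max? word_count.values (fun x => x) with
  | none => []
  | some max_freq =>
      -- for word in word_count: if word_count[word] == max_freq: res.append(word)
      word_count.keys.foldl (fun res word =>
        if word_count.getD word 0 = max_freq then res ++ [word] else res) []

-- ===== PORT B =====
def find_most_frequent_keywords_alt (scenes : List (String × List String)) : List String :=
  let counts : PySem.Dict String Int :=
    scenes.foldl (fun d p =>
      p.2.foldl (fun d w => d.insert w (d.getD w 0 + 1)) d) PySem.Dict.empty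
  -- best = None; res = []; for w, c in counts.items(): …
  (counts.items.foldl (fun st p =>
      match st.1 with
      | none => (some p.2, [p.1])
      | some b =>
          if p.2 > b then (some p.2, [p.1])
          else if p.2 = b then (st.1, st.2 ++ [p.1])
          else st) ((none : Option Int), ([] : List String))).2

-- ===== PRECONDITION & SPEC =====
-- Pre_ excludes exactly the inputs where A raises ValueError (max() of an empty
-- sequence): inputs in which every scene's keyword list is empty.
def Pre_find_most_frequent_keywords (scenes : List (String × List String)) : Prop :=
  scenes.any (fun p => !p.2.isEmpty) = true
instance (scenes : List (String × List String)) : Decidable (Pre_find_most_frequent_keywords scenes) := by unfold Pre_find_most_frequent_keywords; infer_instance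

def pvWitness_find_most_frequent_keywords : (List (String × List String)) :=
  [("s1", ["a", "b", "a"]), ("s2", ["b", "a"])]

def Spec_find_most_frequent_keywords (scenes : List (String × List String)) (out : List String) : Prop := out = find_most_frequent_keywords_alt scenes
instance (scenes : List (String × List String)) (out : List String) : Decidable (Spec_find_most_frequent_keywords scenes out) := by unfold Spec_find_most_frequent_keywords; infer_instance

-- ===== CLAIM (what is proved, stated in full; the proofs are below) =====
def Claim_equal_find_most_frequent_keywords : Prop := ∀ (scenes : List (String × List String)), Dom_find_most_frequent_keywords scenes → Pre_find_most_frequent_keywords scenes → Spec_find_most_frequent_keywords scenes (find_most_frequent_keywords scenes)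

-- ===== LEMMAS AND PROOFS =====

-- The two counting loops build the same dict (when a key is absent, getD _ 0 = 0,
-- so A's else-branch insert of 1 is B's unconditional insert of getD + 1).
lemma count_step_eq :
    (fun (d : PySem.Dict String Int) (keyword : String) =>
        if d.contains keyword then d.insert keyword (d.getD keyword 0 + 1)
        else d.insert keyword 1)
    = (fun (d : PySem.Dict String Int) (w : String) => d.insert w (d.getD w 0 + 1)) := by
  funext d k
  by_cases h : d.contains k
  · simp [h]
  · have h' : d.contains k = false := by simpa using h
    rw [PySem.Dict.getD_of_not_contains (h := h')]
    simp [h']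

-- The nested counting loop over scenes is the loop over the flattened keyword list.
lemma nested_foldl_eq_flatMap {κ : Type} (f : PySem.Dict String Int → String → PySem.Dict String Int)
    (ss : List (κ × List String)) : ∀ (d : PySem.Dict String Int),
    ss.foldl (fun d p => p.2.foldl f d) d = (ss.flatMap (·.2)).foldl f d := by
  induction ss with
  | nil => intro d; simp
  | cons p t ih => intro d; simp [List.foldl_append, ih]

-- B's one-pass loop after its first step: the running best is the running max of the
-- frequencies seen, and the collected list is the kept prefix plus the words whose
-- frequency equals that max.
lemma onepass_some {α : Type} (l : List (α × Int)) : ∀ (bv : Int) (r : List α),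
    l.foldl (fun (st : Option Int × List α) p =>
        match st.1 with
        | none => (some p.2, [p.1])
        | some b =>
            if p.2 > b then (some p.2, [p.1])
            else if p.2 = b then (st.1, st.2 ++ [p.1])
            else st) (some bv, r)
    = (some ((l.map Prod.snd).foldl max bv),
       (if bv = (l.map Prod.snd).foldl max bv then r else []) ++
         (l.filter (fun p => p.2 = (l.map Prod.snd).foldl max bv)).map Prod.fst) := by
  induction l with
  | nil => intro bv r; simp
  | cons p t ih =>
    intro bv r
    obtain ⟨w, c⟩ := p
    have hmax := (PySem.List.le_foldl_max (t.map Prod.snd) (max bv c)).1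
    simp only [List.foldl_cons, List.map_cons, List.filter_cons]
    rcases lt_trichotomy c bv with hlt | heq | hgt
    · have hm : max bv c = bv := by omega
      rw [hm] at hmax
      simp only [hm]
      rw [if_neg (show ¬ c > bv by omega), if_neg (show ¬ c = bv by omega), ih bv r]
      have hcM : ¬ (c = (t.map Prod.snd).foldl max bv) := by omega
      simp [hcM]
    · subst heq
      have hm : max c c = c := by omega
      rw [hm] at hmax
      simp only [hm]
      rw [if_neg (show ¬ c > c by omega)]
      simp only [if_true]
      rw [ih c (r ++ [w])]
      by_cases hM : c = (t.map Prod.snd).foldl max c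
      · simp [← hM, List.append_assoc]
      · simp [hM]
    · have hm : max bv c = c := by omega
      rw [hm] at hmax
      simp only [hm]
      rw [if_pos (show c > bv from hgt), ih c [w]]
      have hbvM : ¬ (bv = (t.map Prod.snd).foldl max c) := by omega
      by_cases hcM : c = (t.map Prod.snd).foldl max c
      · rw [← hcM]
        simp [show ¬ bv = c by omega]
      · simp [hbvM, hcM]

lemma main_eq (scenes : List (String × List String))
    (hpre : scenes.any (fun p => !p.2.isEmpty) = true) :
    find_most_frequent_keywords scenes = find_most_frequent_keywords_alt scenes := by
  simp only [find_most_frequent_keywords, find_most_frequent_keywords_alt]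
  rw [count_step_eq, nested_foldl_eq_flatMap,
      PySem.Dict.foldl_insert_getD_add_one_eq_counter]
  set flat := scenes.flatMap (·.2) with hflatdef
  set cnt := PySem.Dict.counter (κ := String) flat with hcnt
  have hnd : cnt.keys.Nodup := PySem.Dict.nodup_keys_counter flat
  have hflat : flat ≠ [] := by
    intro h
    simp only [List.any_eq_true] at hpre
    obtain ⟨p, hmem, hne⟩ := hpre
    have hsub : ∀ x ∈ p.2, x ∈ flat := fun x hx => List.mem_flatMap.mpr ⟨p, hmem, hx⟩
    rcases hp2 : p.2 with _ | ⟨w, ws⟩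
    · simp [hp2] at hne
    · have : w ∈ flat := hsub w (by simp [hp2])
      simp [h] at this
  have hkeys : cnt.keys ≠ [] := by
    rw [hcnt, PySem.Dict.keys_counter]
    rcases flat with _ | ⟨x, xs⟩
    · exact absurd rfl hflat
    · intro h
      have hx : x ∈ PySem.Set.ofList (x :: xs) := by
        simp [PySem.Set.mem_ofList]
      simp [h] at hx
  rw [PySem.Dict.items_eq_map_keys cnt hnd 0, PySem.Dict.values_eq_map_keys cnt hnd 0]
  rcases hks : cnt.keys with _ | ⟨k0, kt⟩
  · exact absurd hks hkeys
  · rw [List.map_cons, PySem.List.max?_id_cons]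
    set M := ((kt.map (fun k => cnt.getD k 0)).foldl max (cnt.getD k0 0)) with hM
    show (k0 :: kt).foldl (fun res word => if cnt.getD word 0 = M then res ++ [word] else res) []
        = (((kt.map (fun k => (k, cnt.getD k 0))).foldl
            (fun (st : Option Int × List String) p =>
              match st.1 with
              | none => (some p.2, [p.1])
              | some b =>
                  if p.2 > b then (some p.2, [p.1])
                  else if p.2 = b then (st.1, st.2 ++ [p.1])
                  else st) (some (cnt.getD k0 0), [k0]))).2
    rw [PySem.List.foldl_append_ite_eq_filter (p := fun w => cnt.getD w 0 = M), onepass_some]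
    simp only [List.map_map, Function.comp_def, List.filter_map, List.filter_cons, List.nil_append]
    rw [← hM]
    by_cases h0 : cnt.getD k0 0 = M
    · simp [h0]
    · simp [h0]

-- ===== VERDICT (by name: the statement is the Claim_ definition above) =====
theorem find_most_frequent_keywords_spec : Claim_equal_find_most_frequent_keywords := by
  intro scenes _ hpre
  unfold Spec_find_most_frequent_keywords
  exact main_eq scenes hpre
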